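-- pv_equiv track=rewrite | github.com/uubram/RTCR | rtcr/barcode.py | get_uppercase_ranges
-- ===== SOURCE A (Python) =====
-- def get_uppercase_ranges(s, skipchars = ""):
--     ranges = []
--     start = 0
--     end = 0
--     while True:
--         if end == len(s) or s[end] in skipchars or not s[end].isupper():
--             if end > start:
--                 ranges.append((start,end))
--             if end == len(s):
--                 return ranges
--             start = end + 1
--         end += 1
-- ===== SOURCE B (Python) =====
-- def get_uppercase_ranges(s, skipchars=""):
--     n = len(s)
--     good = [c.isupper() and c not in skipchars for c in s]
--     starts = [i for i in range(n) if good[i] and (i == 0 or not good[i - 1])]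
--     ends = [j for j in range(1, n + 1) if good[j - 1] and (j == n or not good[j])]
--     return list(zip(starts, ends))
-- ===== Notes on version B (the rewrite author's own statement) =====
-- stated objective: alternative
-- what changed: Replaces A's stateful start/end-tracking scan with boundary detection: a precomputed predicate list, two independent index filters that find run starts (predicate rises) and run ends (predicate falls) by comparing neighbouring entries, zipped into ranges.
import Mathlib
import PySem

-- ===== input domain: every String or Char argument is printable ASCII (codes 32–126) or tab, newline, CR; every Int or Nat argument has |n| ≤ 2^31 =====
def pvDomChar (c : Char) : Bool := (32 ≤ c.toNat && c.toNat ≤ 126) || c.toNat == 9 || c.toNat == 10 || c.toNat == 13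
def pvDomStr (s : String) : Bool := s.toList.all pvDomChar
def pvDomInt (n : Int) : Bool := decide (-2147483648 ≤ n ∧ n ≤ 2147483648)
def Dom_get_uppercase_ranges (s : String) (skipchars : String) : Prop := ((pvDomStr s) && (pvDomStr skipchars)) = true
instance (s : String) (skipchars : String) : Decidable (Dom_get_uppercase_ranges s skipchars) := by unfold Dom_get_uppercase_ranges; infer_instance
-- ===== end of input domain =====

-- B replaces A's stateful start/end-tracking scan with boundary detection: two
-- independent index filters find run starts and run ends, then zip pairs them.

-- ===== PORT A =====
-- A's while-loop, state (ranges, start, end); 'end == len(s)' checked first, so the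
-- 'cs.length ≤ e' guard only makes the same computation total (reachable states have e ≤ len).
def get_uppercase_ranges_go (cs skip : List Char) (ranges : List (Int × Int))
    (start e : Nat) : List (Int × Int) :=
  if he : cs.length ≤ e then
    -- end == len(s): final append (if end > start) and return
    if start < e then ranges ++ [((start : Int), (e : Int))] else ranges
  else
    let c := cs.getD e ' '   -- s[end], in range here
    if skip.contains c || !(PySem.Chars.isupper c) then
      -- 's[end] in skipchars or not s[end].isupper()' (single-char membership = contains)
      get_uppercase_ranges_go cs skip
        (if start < e then ranges ++ [((start : Int), (e : Int))] else ranges) (e + 1) (e + 1)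
    else
      get_uppercase_ranges_go cs skip ranges start (e + 1)
  termination_by cs.length - e
  decreasing_by all_goals omega

def get_uppercase_ranges (s : String) (skipchars : String) : List (Int × Int) :=
  get_uppercase_ranges_go s.toList skipchars.toList [] 0 0

-- ===== PORT B =====
-- good = [c.isupper() and c not in skipchars for c in s]
-- starts = [i for i in range(n) if good[i] and (i == 0 or not good[i-1])]
-- ends   = [j for j in range(1, n+1) if good[j-1] and (j == n or not good[j])]
-- return list(zip(starts, ends))
def get_uppercase_ranges_alt (s : String) (skipchars : String) : List (Int × Int) :=
  let cs := s.toList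
  let n := cs.length
  let good := cs.map (fun c => PySem.Chars.isupper c && !(skipchars.toList.contains c))
  let starts := ((List.range n).filter
      (fun i => good.getD i false && (decide (i = 0) || !(good.getD (i - 1) false)))).map Int.ofNat
  let ends := ((List.range' 1 n).filter
      (fun j => good.getD (j - 1) false && (decide (j = n) || !(good.getD j false)))).map Int.ofNat
  List.zip starts ends

-- ===== PRECONDITION & SPEC =====
def Spec_get_uppercase_ranges (s : String) (skipchars : String) (out : List (Int × Int)) : Prop := out = get_uppercase_ranges_alt s skipchars
instance (s : String) (skipchars : String) (out : List (Int × Int)) : Decidable (Spec_get_uppercase_ranges s skipchars out) := by unfold Spec_get_uppercase_ranges; infer_instance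

-- ===== CLAIM (what is proved, stated in full; the proofs are below) =====
def Claim_equal_get_uppercase_ranges : Prop := ∀ (s : String) (skipchars : String), Dom_get_uppercase_ranges s skipchars → Spec_get_uppercase_ranges s skipchars (get_uppercase_ranges s skipchars)

-- ===== LEMMAS AND PROOFS =====

-- canonical description of the result: maximal true-runs of a boolean trace
def specGo (start i : Nat) : List Bool → List (Int × Int)
  | [] => if start < i then [((start : Int), (i : Int))] else []
  | b :: bs =>
      if b then specGo start (i + 1) bs
      else (if start < i then [((start : Int), (i : Int))] else []) ++ specGo (i + 1) (i + 1) bs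

def predc (skip : List Char) (c : Char) : Bool :=
  PySem.Chars.isupper c && !(skip.contains c)

lemma goA_eq_specGo (n : Nat) : ∀ (cs skip : List Char) (ranges : List (Int × Int)) (start e : Nat),
    cs.length - e ≤ n → e ≤ cs.length →
    get_uppercase_ranges_go cs skip ranges start e
      = ranges ++ specGo start e ((cs.drop e).map (predc skip)) := by
  induction n with
  | zero =>
    intro cs skip ranges start e hn he
    have hlen : cs.length = e := by omega
    rw [get_uppercase_ranges_go]
    simp only [hlen, le_refl, dite_true, List.drop_of_length_le, List.map_nil, specGo]
    split <;> simp_all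
  | succ n ih =>
    intro cs skip ranges start e hn he
    by_cases hlt : e < cs.length
    · rw [get_uppercase_ranges_go]
      have hget : cs.getD e ' ' = cs[e] := List.getD_eq_getElem cs ' ' hlt
      have hdrop : cs.drop e = cs[e] :: cs.drop (e + 1) := List.drop_eq_getElem_cons hlt
      simp only [Nat.not_le.mpr hlt, hget]
      rw [hdrop]
      by_cases hp : predc skip cs[e] = true
      · have hbreak : (skip.contains cs[e] || !(PySem.Chars.isupper cs[e])) = false := by
          cases hcon : skip.contains cs[e] <;> cases hup : PySem.Chars.isupper cs[e] <;>
            simp_all [predc]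
        rw [hbreak]
        simp only [Bool.false_eq_true, if_false, List.map_cons, specGo, hp, if_true]
        exact ih cs skip ranges start (e + 1) (by omega) (by omega)
      · have hbreak : (skip.contains cs[e] || !(PySem.Chars.isupper cs[e])) = true := by
          cases hcon : skip.contains cs[e] <;> cases hup : PySem.Chars.isupper cs[e] <;>
            simp_all [predc]
        rw [hbreak]
        simp only [if_true, List.map_cons, specGo, hp, Bool.false_eq_true, if_false]
        rw [ih cs skip _ (e + 1) (e + 1) (by omega) (by omega)]
        rw [List.map_drop]
        by_cases hse : start < e <;> simp [hse]
    · have hlen : cs.length = e := by omega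
      rw [get_uppercase_ranges_go]
      simp only [hlen, le_refl, dite_true, List.drop_of_length_le, List.map_nil, specGo]
      split <;> simp_all

-- rising edges: p is the predicate value at position i-1 (false at i = 0)
def startsF (p : Bool) (i : Nat) : List Bool → List Nat
  | [] => []
  | b :: bs => (if b && !p then [i] else []) ++ startsF b (i + 1) bs

-- falling edges (exclusive ends): p is the predicate value at position i-1
def endsF (p : Bool) (i : Nat) : List Bool → List Nat
  | [] => if p then [i] else []
  | b :: bs => (if p && !b then [i] else []) ++ endsF b (i + 1) bs

-- zipping starts with ends reproduces specGo
lemma zip_spec : ∀ (bs : List Bool) (i : Nat),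
    (List.zip ((startsF false i bs).map Int.ofNat) ((endsF false i bs).map Int.ofNat)
        = specGo i i bs) ∧
    (∀ start : Nat, start < i →
      List.zip (((start :: startsF true i bs)).map Int.ofNat) ((endsF true i bs).map Int.ofNat)
        = specGo start i bs) := by
  intro bs
  induction bs with
  | nil =>
    intro i
    constructor
    · simp [startsF, endsF, specGo]
    · intro start h
      simp [startsF, endsF, specGo, h]
  | cons b rest ih =>
    intro i
    constructor
    · cases b
      · simp only [startsF, endsF, specGo, Bool.false_eq_true, if_false,
          Bool.not_false, Bool.and_true, List.nil_append, Nat.lt_irrefl]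
        exact (ih (i + 1)).1
      · simp only [startsF, endsF, specGo, if_true, Bool.true_and, Bool.not_false,
          Bool.false_and, Bool.false_eq_true, if_false, List.nil_append, List.singleton_append]
        exact (ih (i + 1)).2 i (by omega)
    · intro start h
      cases b
      · simp only [startsF, endsF, specGo, Bool.false_eq_true, if_false, Bool.false_and,
          Bool.not_false, Bool.true_and, if_true, List.nil_append, List.singleton_append,
          List.map_cons, List.zip_cons_cons, h]
        rw [(ih (i + 1)).1]
        rfl
      · simp only [startsF, endsF, specGo, if_true, Bool.true_and, Bool.not_true,
          Bool.and_false, Bool.false_eq_true, if_false, List.nil_append]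
        exact (ih (i + 1)).2 start (by omega)

lemma if_cons_eq_append {α : Type} (c : Prop) [Decidable c] (x : α) (l : List α) :
    (if c then x :: l else l) = (if c then [x] else []) ++ l := by
  split <;> simp

-- the predicate value just before position i (false at the left edge / out of range)
def prevB (good : List Bool) (i : Nat) : Bool := !(decide (i = 0)) && good.getD (i - 1) false

lemma starts_filter (good : List Bool) : ∀ (k i : Nat), good.length - i ≤ k →
    (List.range' i (good.length - i)).filter
        (fun j => good.getD j false && (decide (j = 0) || !(good.getD (j - 1) false)))
      = startsF (prevB good i) i (good.drop i) := by
  intro k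
  induction k with
  | zero =>
    intro i h
    have : good.length ≤ i := by omega
    simp [Nat.sub_eq_zero_of_le this, List.drop_of_length_le this, startsF]
  | succ k ih =>
    intro i h
    by_cases hlt : i < good.length
    · have hdrop : good.drop i = good[i] :: good.drop (i + 1) := List.drop_eq_getElem_cons hlt
      have hcnt : good.length - i = (good.length - (i + 1)) + 1 := by omega
      have hgetD : good.getD i false = good[i] := List.getD_eq_getElem good false hlt
      have hnext : prevB good (i + 1) = good[i] := by
        unfold prevB
        simp [List.getD, List.getElem?_eq_getElem hlt]
      have hcond : (good.getD i false && (decide (i = 0) || !(good.getD (i - 1) false)))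
          = (good[i] && !(prevB good i)) := by
        rw [hgetD]; unfold prevB
        cases h0 : decide (i = 0) <;> simp_all
      rw [hcnt, List.range'_succ]
      simp only [List.filter_cons]
      rw [hcond, hdrop, startsF, ← hnext, ← ih (i + 1) (by omega), if_cons_eq_append]
    · have : good.length ≤ i := by omega
      simp [Nat.sub_eq_zero_of_le this, List.drop_of_length_le this, startsF]

lemma ends_filter (good : List Bool) : ∀ (k i : Nat), 1 ≤ i → good.length + 1 - i ≤ k →
    (List.range' i (good.length + 1 - i)).filter
        (fun j => good.getD (j - 1) false && (decide (j = good.length) || !(good.getD j false)))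
      = endsF (good.getD (i - 1) false) i (good.drop i) := by
  intro k
  induction k with
  | zero =>
    intro i h1 h
    have hi : good.length + 1 ≤ i := by omega
    have hout : good.getD (i - 1) false = false := by
      apply List.getD_eq_default
      omega
    simp only [Nat.sub_eq_zero_of_le hi, List.range'_zero, List.filter_nil,
      List.drop_of_length_le (by omega : good.length ≤ i), endsF, hout,
      Bool.false_eq_true, if_false]
  | succ k ih =>
    intro i h1 h
    by_cases hle : i ≤ good.length
    · have hcnt : good.length + 1 - i = (good.length + 1 - (i + 1)) + 1 := by omega
      by_cases hlt : i < good.length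
      · have hdrop : good.drop i = good[i] :: good.drop (i + 1) := List.drop_eq_getElem_cons hlt
        have hgetD : good.getD i false = good[i] := List.getD_eq_getElem good false hlt
        have hnext : good.getD (i + 1 - 1) false = good[i] := by
          simp [List.getD, List.getElem?_eq_getElem hlt]
        have hcond : (good.getD (i - 1) false && (decide (i = good.length) || !(good.getD i false)))
            = (good.getD (i - 1) false && !good[i]) := by
          rw [hgetD]
          have : decide (i = good.length) = false := by simp; omega
          rw [this]; simp
        rw [hcnt, List.range'_succ]
        simp only [List.filter_cons]
        rw [hcond, hdrop, endsF, ← hnext, ← ih (i + 1) (by omega) (by omega),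
          if_cons_eq_append]
      · -- i = good.length: last index of range(1, n+1)
        have hi : i = good.length := by omega
        have hdrop : good.drop i = [] := List.drop_of_length_le (by omega)
        have hcond : (good.getD (i - 1) false && (decide (i = good.length) || !(good.getD i false)))
            = good.getD (i - 1) false := by
          have : decide (i = good.length) = true := by simp [hi]
          rw [this]; simp
        have hempty : good.length + 1 - (i + 1) = 0 := by omega
        rw [hcnt, List.range'_succ]
        simp only [List.filter_cons]
        rw [hcond, hdrop, endsF, hempty]
        split <;> simp
    · have hi : good.length + 1 ≤ i := by omega
      have hout : good.getD (i - 1) false = false := by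
        apply List.getD_eq_default
        omega
      simp only [Nat.sub_eq_zero_of_le hi, List.range'_zero, List.filter_nil,
        List.drop_of_length_le (by omega : good.length ≤ i), endsF, hout,
        Bool.false_eq_true, if_false]

-- one unfolding step: ends over range(1, n+1) is endsF from the left edge
lemma endsF_zero (good : List Bool) :
    endsF (good.getD 0 false) 1 (good.drop 1) = endsF false 0 good := by
  cases good with
  | nil => simp [endsF]
  | cons b rest => simp [endsF]

-- ===== VERDICT (by name: the statement is the Claim_ definition above) =====
theorem get_uppercase_ranges_spec : Claim_equal_get_uppercase_ranges := by
  intro s skipchars _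
  unfold Spec_get_uppercase_ranges
  unfold get_uppercase_ranges get_uppercase_ranges_alt
  set cs := s.toList
  set skip := skipchars.toList with hskip
  have hA := goA_eq_specGo cs.length cs skip [] 0 0 (by omega) (by omega)
  simp only [List.drop_zero, List.nil_append] at hA
  rw [hA]
  set good := cs.map (predc skip) with hgood
  have hmap : cs.map (fun c => PySem.Chars.isupper c && !(skip.contains c)) = good := by
    rw [hgood]; rfl
  simp only [hmap]
  have hlen : cs.length = good.length := by simp [hgood]
  have hS := starts_filter good good.length 0 (by omega)
  have hE := ends_filter good (good.length + 1) 1 (by omega) (by omega)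
  rw [List.range_eq_range', hlen]
  simp only [Nat.sub_zero] at hS
  have hcnt : good.length + 1 - 1 = good.length := by omega
  rw [hcnt] at hE
  rw [hS, hE, endsF_zero good]
  have hprev : prevB good 0 = false := by simp [prevB]
  rw [hprev, List.drop_zero]
  exact ((zip_spec good 0).1).symm
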